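-- pv_equiv track=rewrite | github.com/yasufumi-nakata/Pytra | src/toolchain/emit/cpp/emitter.py | _union_effectively_single_type
-- ===== SOURCE A (Python) =====
-- def _split_top_level_union_type(type_name: str) -> list[str]:
--     parts: list[str] = []
--     depth = 0
--     current: list[str] = []
--     i = 0
--     while i < len(type_name):
--         ch = type_name[i]
--         if ch in "[<(":
--             depth += 1
--             current.append(ch)
--         elif ch in "]>)":
--             depth -= 1
--             current.append(ch)
--         elif ch == "|" and depth == 0:
--             part = "".join(current).strip()
--             if part != "":
--                 parts.append(part)
--             current = []
--         else:
--             current.append(ch)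
--         i += 1
--     tail = "".join(current).strip()
--     if tail != "":
--         parts.append(tail)
--     return parts
--
-- def _is_top_level_union_type(type_name: str) -> bool:
--     return len(_split_top_level_union_type(type_name)) > 1
--
-- def _union_effectively_single_type(type_name: str, expected: str) -> bool:
--     if not _is_top_level_union_type(type_name):
--         return False
--     lanes = [lane for lane in _split_top_level_union_type(type_name) if lane not in ("None", "none")]
--     if len(lanes) == 0:
--         return False
--     for lane in lanes:
--         if lane != expected:
--             return False
--     return True
-- ===== SOURCE B (Python) =====
-- def _union_effectively_single_type(type_name: str, expected: str) -> bool: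
--     # One-pass scan with running counters/flags: no part lists are built.
--     parts = 0
--     has_real = False
--     mismatch = False
--
--     def close(buf: str) -> None:
--         nonlocal parts, has_real, mismatch
--         lane = buf.strip()
--         if lane:
--             parts += 1
--             if lane != "None" and lane != "none":
--                 has_real = True
--                 if lane != expected:
--                     mismatch = True
--
--     depth = 0
--     buf = ""
--     for ch in type_name:
--         if ch in "[<(":
--             depth += 1
--             buf += ch
--         elif ch in "]>)":
--             depth -= 1
--             buf += ch
--         elif ch == "|" and depth == 0:
--             close(buf)
--             buf = ""
--         else:
--             buf += ch
--     close(buf)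
--     return parts > 1 and has_real and not mismatch
-- ===== Notes on version B (the rewrite author's own statement) =====
-- stated objective: simpler
-- what changed: Replaces A's build-the-parts-list (called twice) + filter-comprehension + early-return check loop by a single character scan that keeps running counters/flags (part count, has-non-None-lane, mismatch) and never materialises any list of lanes.
import Mathlib
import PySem

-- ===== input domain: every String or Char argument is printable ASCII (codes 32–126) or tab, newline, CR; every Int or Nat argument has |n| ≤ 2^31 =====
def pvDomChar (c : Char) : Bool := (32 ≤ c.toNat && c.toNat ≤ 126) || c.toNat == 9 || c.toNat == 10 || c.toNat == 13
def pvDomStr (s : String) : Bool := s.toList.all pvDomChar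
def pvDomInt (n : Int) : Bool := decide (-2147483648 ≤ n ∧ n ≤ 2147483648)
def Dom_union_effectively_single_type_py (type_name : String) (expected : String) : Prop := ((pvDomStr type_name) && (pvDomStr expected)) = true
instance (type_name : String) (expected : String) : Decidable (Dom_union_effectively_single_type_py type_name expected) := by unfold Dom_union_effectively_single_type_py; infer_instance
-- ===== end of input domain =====

-- B replaces A's split-into-list + filter + check loop by a single one-pass scan with
-- running counters/flags (simpler decomposition, no intermediate lists).

-- ===== PORT A =====
-- _split_top_level_union_type, as a structural recursion over the characters
-- (state: depth, current buffer, accumulated parts; strings handled as List Char).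
def pySplitTop : List Char → Int → List Char → List (List Char) → List (List Char)
  | [], _, current, parts =>
      let tail := PySem.Chars.strip current
      if tail ≠ [] then parts ++ [tail] else parts
  | ch :: rest, depth, current, parts =>
      if ch = '[' ∨ ch = '<' ∨ ch = '(' then
        pySplitTop rest (depth + 1) (current ++ [ch]) parts
      else if ch = ']' ∨ ch = '>' ∨ ch = ')' then
        pySplitTop rest (depth - 1) (current ++ [ch]) parts
      else if ch = '|' ∧ depth = 0 then
        let part := PySem.Chars.strip current
        pySplitTop rest depth [] (if part ≠ [] then parts ++ [part] else parts)
      else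
        pySplitTop rest depth (current ++ [ch]) parts

-- the final for-loop of A, with its early return
def pyCheckAll : List (List Char) → List Char → Bool
  | [], _ => true
  | lane :: rest, expected => if lane ≠ expected then false else pyCheckAll rest expected

def union_effectively_single_type_py (type_name : String) (expected : String) : Bool :=
  let cs := type_name.toList
  if ¬ ((pySplitTop cs 0 [] []).length > 1) then false
  else
    let lanes := (pySplitTop cs 0 [] []).filter
      (fun lane => ¬ (lane = "None".toList ∨ lane = "none".toList))
    if lanes.length = 0 then false
    else pyCheckAll lanes expected.toList

-- ===== PORT B =====
-- the nested 'close' of Source B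
def altClose (expected : List Char) (st : Int × Bool × Bool) (buf : List Char) : Int × Bool × Bool :=
  let lane := PySem.Chars.strip buf
  if lane ≠ [] then
    if lane ≠ "None".toList ∧ lane ≠ "none".toList then
      (st.1 + 1, true, st.2.2 || decide (lane ≠ expected))
    else (st.1 + 1, st.2.1, st.2.2)
  else st

def altLoop (expected : List Char) : List Char → Int → List Char → (Int × Bool × Bool) → (Int × Bool × Bool)
  | [], _, buf, st => altClose expected st buf
  | ch :: rest, depth, buf, st =>
      if ch = '[' ∨ ch = '<' ∨ ch = '(' then
        altLoop expected rest (depth + 1) (buf ++ [ch]) st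
      else if ch = ']' ∨ ch = '>' ∨ ch = ')' then
        altLoop expected rest (depth - 1) (buf ++ [ch]) st
      else if ch = '|' ∧ depth = 0 then
        altLoop expected rest depth [] (altClose expected st buf)
      else
        altLoop expected rest depth (buf ++ [ch]) st

def union_effectively_single_type_py_alt (type_name : String) (expected : String) : Bool :=
  let r := altLoop expected.toList type_name.toList 0 [] (0, false, false)
  decide (r.1 > 1) && r.2.1 && !r.2.2

-- ===== PRECONDITION & SPEC =====
def Spec_union_effectively_single_type_py (type_name : String) (expected : String) (out : Bool) : Prop := out = union_effectively_single_type_py_alt type_name expected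
instance (type_name : String) (expected : String) (out : Bool) : Decidable (Spec_union_effectively_single_type_py type_name expected out) := by unfold Spec_union_effectively_single_type_py; infer_instance

-- ===== CLAIM (what is proved, stated in full; the proofs are below) =====
def Claim_equal_union_effectively_single_type_py : Prop := ∀ (type_name : String) (expected : String), Dom_union_effectively_single_type_py type_name expected → Spec_union_effectively_single_type_py type_name expected (union_effectively_single_type_py type_name expected)

-- ===== LEMMAS AND PROOFS =====

-- one closed lane processed on B's side (the inner branch of altClose, for a nonempty lane)
def laneStep (expected : List Char) (st : Int × Bool × Bool) (lane : List Char) : Int × Bool × Bool :=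
  if lane ≠ "None".toList ∧ lane ≠ "none".toList then
    (st.1 + 1, true, st.2.2 || decide (lane ≠ expected))
  else (st.1 + 1, st.2.1, st.2.2)

theorem altClose_eq (e : List Char) (st : Int × Bool × Bool) (buf : List Char) :
    altClose e st buf =
      if PySem.Chars.strip buf ≠ [] then laneStep e st (PySem.Chars.strip buf) else st := by
  simp [altClose, laneStep]

-- A's parts accumulator only ever gets appended to
theorem pySplitTop_acc (cs : List Char) : ∀ (d : Int) (cur : List Char) (P : List (List Char)),
    pySplitTop cs d cur P = P ++ pySplitTop cs d cur [] := by
  induction cs with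
  | nil => intro d cur P; simp [pySplitTop]; split <;> simp
  | cons ch rest ih =>
      intro d cur P
      simp only [pySplitTop]
      split
      · exact ih _ _ _
      · split
        · exact ih _ _ _
        · split
          · split
            · rw [ih d [] (P ++ [PySem.Chars.strip cur]), ih d [] ([] ++ [PySem.Chars.strip cur])]
              simp
            · exact ih _ _ _
          · exact ih _ _ _

-- B's loop is the fold of laneStep over A's parts
theorem altLoop_eq_foldl (e : List Char) (cs : List Char) :
    ∀ (d : Int) (buf : List Char) (st : Int × Bool × Bool),
    altLoop e cs d buf st = List.foldl (laneStep e) st (pySplitTop cs d buf []) := by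
  induction cs with
  | nil =>
      intro d buf st
      simp only [altLoop, pySplitTop, altClose_eq]
      split <;> simp
  | cons ch rest ih =>
      intro d buf st
      simp only [altLoop, pySplitTop]
      split
      · exact ih _ _ _
      · split
        · exact ih _ _ _
        · split
          · rw [ih, altClose_eq]
            split
            · rename_i hs
              simp only [List.nil_append]
              rw [pySplitTop_acc rest d [] [PySem.Chars.strip buf]]
              simp
            · simp
          · exact ih _ _ _

-- the fold of laneStep, in closed form
theorem foldl_laneStep (e : List Char) (L : List (List Char)) :
    ∀ (p : Int) (h m : Bool),
    List.foldl (laneStep e) (p, h, m) L =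
      (p + L.length,
       h || L.any (fun l => ¬ (l = "None".toList ∨ l = "none".toList)),
       m || L.any (fun l => ¬ (l = "None".toList ∨ l = "none".toList) ∧ l ≠ e)) := by
  induction L with
  | nil => intro p h m; simp
  | cons lane rest ih =>
      intro p h m
      simp only [List.foldl_cons, laneStep]
      split
      · rename_i hr
        have h1 : ¬ lane = ['N', 'o', 'n', 'e'] := hr.1
        have h2 : ¬ lane = ['n', 'o', 'n', 'e'] := hr.2
        rw [ih]
        simp only [List.any_cons, List.length_cons, Prod.mk.injEq]
        refine ⟨by push_cast; ring, ?_, ?_⟩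
        · simp [h1, h2]
        · simp [h1, h2, Bool.or_assoc]
      · rename_i hr
        rw [ih]
        have hval : lane = "None".toList ∨ lane = "none".toList := by
          rcases not_and_or.mp hr with h | h
          · exact Or.inl (not_not.mp h)
          · exact Or.inr (not_not.mp h)
        simp only [List.any_cons, List.length_cons, Prod.mk.injEq]
        refine ⟨by push_cast; ring, ?_, ?_⟩ <;> rcases hval with h | h <;> simp [h]

-- A's final loop is an all over the filtered lanes
theorem pyCheckAll_eq (e : List Char) (L : List (List Char)) :
    pyCheckAll L e = L.all (fun l => l = e) := by
  induction L with
  | nil => simp [pyCheckAll]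
  | cons lane rest ih => by_cases hne : lane = e <;> simp [pyCheckAll, hne, ih]

-- the filtered all-loop versus the one-pass mismatch flag
theorem all_filter_not_any (e : List Char) (L : List (List Char)) :
    ((L.filter fun l => decide (¬ (l = "None".toList ∨ l = "none".toList))).all fun l => decide (l = e))
      = !(L.any fun l => decide (¬ (l = "None".toList ∨ l = "none".toList) ∧ l ≠ e)) := by
  induction L with
  | nil => simp
  | cons lane rest ih =>
      by_cases hr : (lane = "None".toList ∨ lane = "none".toList)
      · have hd : decide (¬ (lane = "None".toList ∨ lane = "none".toList) ∧ lane ≠ e) = false := by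
          rcases hr with h | h <;> simp [h]
        rw [List.filter_cons, if_neg (by rcases hr with h | h <;> simp [h]),
          List.any_cons, hd, Bool.false_or, ih]
      · have h1 : ¬ lane = ['N', 'o', 'n', 'e'] := fun h => hr (Or.inl h)
        have h2 : ¬ lane = ['n', 'o', 'n', 'e'] := fun h => hr (Or.inr h)
        rw [List.filter_cons, if_pos (by simp [h1, h2]), List.all_cons, List.any_cons, ih]
        by_cases hle : lane = e
        · have he1 : decide (lane = e) = true := by simp [hle]
          have he2 : decide (¬ (lane = "None".toList ∨ lane = "none".toList) ∧ lane ≠ e) = false := by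
            simp [hle]
          rw [he1, he2, Bool.true_and, Bool.false_or]
        · have he1 : decide (lane = e) = false := by simp [hle]
          have he2 : decide (¬ (lane = "None".toList ∨ lane = "none".toList) ∧ lane ≠ e) = true := by
            simp [h1, h2, hle]
          rw [he1, he2]
          simp

-- ===== VERDICT (by name: the statement is the Claim_ definition above) =====
theorem union_effectively_single_type_py_spec : Claim_equal_union_effectively_single_type_py := by
  intro type_name expected _
  unfold Spec_union_effectively_single_type_py
  unfold union_effectively_single_type_py union_effectively_single_type_py_alt
  rw [altLoop_eq_foldl, foldl_laneStep]
  simp only [Bool.false_or, zero_add]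
  by_cases hlen : (pySplitTop type_name.toList 0 [] []).length > 1
  · have hlen' : (1 : Int) < ((pySplitTop type_name.toList 0 [] []).length : Int) := by
      exact_mod_cast hlen
    by_cases hany : ((pySplitTop type_name.toList 0 [] []).any
        fun l => decide (¬ (l = "None".toList ∨ l = "none".toList))) = true
    · have hfil : ¬ ((pySplitTop type_name.toList 0 [] []).filter
          (fun lane => decide (¬ (lane = "None".toList ∨ lane = "none".toList)))).length = 0 := by
        simp only [List.length_eq_zero_iff, List.filter_eq_nil_iff]
        simp only [List.any_eq_true] at hany
        obtain ⟨x, hx, hpx⟩ := hany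
        intro hall
        exact absurd hpx (by simpa using hall x hx)
      rw [if_neg (not_not_intro hlen), if_neg hfil, pyCheckAll_eq, all_filter_not_any,
        decide_eq_true hlen', hany]
      simp
    · have hfil : ((pySplitTop type_name.toList 0 [] []).filter
          (fun lane => decide (¬ (lane = "None".toList ∨ lane = "none".toList)))).length = 0 := by
        simp only [List.length_eq_zero_iff, List.filter_eq_nil_iff]
        have hany' := eq_false_of_ne_true hany
        simp only [List.any_eq_false] at hany'
        intro a ha
        simpa using hany' a ha
      rw [if_neg (not_not_intro hlen), if_pos hfil, eq_false_of_ne_true hany]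
      simp
  · have hlen' : ¬ ((1 : Int) < ((pySplitTop type_name.toList 0 [] []).length : Int)) := by
      exact_mod_cast hlen
    rw [if_pos hlen, decide_eq_false hlen']
    simp
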